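-- pv_equiv track=rewrite | github.com/DamnGachi/Codewars | 6 kyu/change it up.py | changer
-- ===== SOURCE A (Python) =====
-- def changer(s):
--     """
--     def changer(s):
--     return s.lower().translate(str.maketrans('abcdefghijklmnopqrstuvwxyz', 'bcdEfghIjklmnOpqrstUvwxyzA'))
--     """
--     res = []
--     res1 = []
--     vowels = ['a', 'u', 'o', 'i', 'e']
--     for i in s:
--         if i.isalpha():
--             res.append(ord(i) + 1)
--         elif i.isdigit() or i.isspace():
--             res.append(ord(i))
--     s1 = ''.join(chr(x) for x in res)
--     for p in s1.lower():
--         if p in vowels: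
--             res1.append(p.title())
--         if p not in vowels:
--             res1.append(p.lower())
--     return ''.join(res1).replace('[', 'A').replace('{','a')
-- ===== SOURCE B (Python) =====
-- # One precomputed translation table + a single pass, instead of A's two passes
-- # with an intermediate ord/chr string and two final .replace() sweeps.
--
-- _TABLE = {}
-- for _c in 'abcdefghijklmnopqrstuvwxy':
--     _n = chr(ord(_c) + 1)
--     _v = _n.upper() if _n in 'aeiou' else _n
--     _TABLE[_c] = _v
--     _TABLE[_c.upper()] = _v
-- _TABLE['z'] = 'a'
-- _TABLE['Z'] = 'A'
-- for _c in '0123456789 \t\n\r':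
--     _TABLE[_c] = _c
--
--
-- def changer(s):
--     return ''.join(_TABLE.get(c, '') for c in s)
-- ===== Notes on version B (the rewrite author's own statement) =====
-- stated objective: faster
-- what changed: B precomputes a single char-to-string translation table (dict) once at module load and produces the output in one pass with TABLE.get, replacing A's two sequential passes over an intermediate ord/chr string plus two whole-string .replace() sweeps.
import Mathlib
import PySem

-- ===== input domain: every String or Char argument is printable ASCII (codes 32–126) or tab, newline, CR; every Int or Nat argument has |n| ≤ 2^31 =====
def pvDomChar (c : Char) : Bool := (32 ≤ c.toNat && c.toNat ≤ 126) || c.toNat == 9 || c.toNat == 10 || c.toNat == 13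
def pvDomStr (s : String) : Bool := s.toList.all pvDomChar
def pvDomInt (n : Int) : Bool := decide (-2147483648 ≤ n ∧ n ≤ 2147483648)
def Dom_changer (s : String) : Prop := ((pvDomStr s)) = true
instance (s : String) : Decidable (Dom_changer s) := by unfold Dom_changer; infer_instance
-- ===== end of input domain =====

-- B builds one char→string translation table once and makes a single pass;
-- same return value as A on the stated domain (neither mutates its argument).

-- ===== PORT A =====
def changer (s : String) : String :=
  let vowels : List Char := ['a', 'u', 'o', 'i', 'e']
  let res : List Nat := s.toList.foldl (fun acc i =>
    if PySem.Chars.isalpha i then acc ++ [i.toNat + 1]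
    else if PySem.Chars.isdigit i || PySem.Chars.isspace i then acc ++ [i.toNat]
    else acc) []
  let s1 : List Char := res.map Char.ofNat
  let res1 : List Char := (PySem.Chars.lower s1).foldl (fun acc p =>
    let acc1 := if p ∈ vowels then acc ++ [PySem.Chars.upperChar p] else acc
    if p ∉ vowels then acc1 ++ [PySem.Chars.lowerChar p] else acc1) []
  String.ofList (PySem.Chars.replace (PySem.Chars.replace res1 ['['] ['A']) ['{'] ['a'])

-- ===== PORT B =====
-- the module-level table of Source B, built by the same loops
def bTable : PySem.Dict Char (List Char) :=
  let d : PySem.Dict Char (List Char) :=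
    ("abcdefghijklmnopqrstuvwxy".toList).foldl (fun d c =>
      let n := Char.ofNat (c.toNat + 1)
      let v := if n ∈ "aeiou".toList then [PySem.Chars.upperChar n] else [n]
      (d.insert c v).insert (PySem.Chars.upperChar c) v) PySem.Dict.empty
  let d := (d.insert 'z' ['a']).insert 'Z' ['A']
  ("0123456789 \t\n\r".toList).foldl (fun d c => d.insert c [c]) d

def changer_alt (s : String) : String :=
  String.ofList (s.toList.flatMap (fun c => bTable.getD c []))

-- ===== PRECONDITION & SPEC =====
def Spec_changer (s : String) (out : String) : Prop := out = changer_alt s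
instance (s : String) (out : String) : Decidable (Spec_changer s out) := by unfold Spec_changer; infer_instance

-- ===== CLAIM (what is proved, stated in full; the proofs are below) =====
def Claim_equal_changer : Prop := ∀ (s : String), Dom_changer s → Spec_changer s (changer s)

-- ===== LEMMAS AND PROOFS =====

-- per-char chunks of A's pipeline
def gRes (i : Char) : List Nat :=
  if PySem.Chars.isalpha i then [i.toNat + 1]
  else if PySem.Chars.isdigit i || PySem.Chars.isspace i then [i.toNat]
  else []

def gVow (p : Char) : List Char :=
  if p ∈ (['a', 'u', 'o', 'i', 'e'] : List Char)
  then [PySem.Chars.upperChar p] else [PySem.Chars.lowerChar p]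

def fA (c : Char) : List Char :=
  (((((gRes c).map Char.ofNat).map PySem.Chars.lowerChar).flatMap gVow).flatMap
      (fun x => if x = '[' then ['A'] else [x])).flatMap (fun x => if x = '{' then ['a'] else [x])

lemma replace_go_single (o : Char) (new : List Char) :
    ∀ (l : List Char) (fuel : Nat) (acc : List Char), l.length ≤ fuel →
      PySem.Chars.replace.go [o] new fuel l acc
        = acc.reverse ++ l.flatMap (fun c => if c = o then new else [c]) := by
  intro l
  induction l with
  | nil =>
      intro fuel acc _
      cases fuel <;> simp [PySem.Chars.replace.go]
  | cons c t ih =>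
      intro fuel acc h
      cases fuel with
      | zero => simp at h
      | succ f =>
        simp only [PySem.Chars.replace.go, List.isPrefixOf]
        by_cases hc : o = c
        · subst hc
          simp only [BEq.rfl, Bool.true_and, if_pos, List.length_cons, List.length_nil,
            List.drop_succ_cons, List.drop_zero]
          rw [ih f (new.reverse ++ acc) (by simpa using Nat.le_of_succ_le_succ h)]
          simp
        · have : (o == c) = false := by simp [hc]
          simp only [this, Bool.false_and, if_neg Bool.false_ne_true]
          rw [ih f (c :: acc) (by simpa using Nat.le_of_succ_le_succ h)]
          simp [Ne.symm hc]

lemma replace_single (s : List Char) (o : Char) (new : List Char) :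
    PySem.Chars.replace s [o] new = s.flatMap (fun c => if c = o then new else [c]) := by
  simp only [PySem.Chars.replace, List.isEmpty_cons, if_neg Bool.false_ne_true]
  simpa using replace_go_single o new s s.length [] le_rfl

lemma changer_eq_flatMap (s : String) :
    changer s = String.ofList (s.toList.flatMap fA) := by
  unfold changer
  have h1 : (fun (acc : List Nat) (i : Char) =>
      if PySem.Chars.isalpha i then acc ++ [i.toNat + 1]
      else if PySem.Chars.isdigit i || PySem.Chars.isspace i then acc ++ [i.toNat]
      else acc) = fun acc i => acc ++ gRes i := by
    funext acc i; simp only [gRes]; split_ifs <;> simp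
  have h2 : (fun (acc : List Char) (p : Char) =>
      let acc1 := if p ∈ (['a', 'u', 'o', 'i', 'e'] : List Char)
                  then acc ++ [PySem.Chars.upperChar p] else acc
      if p ∉ (['a', 'u', 'o', 'i', 'e'] : List Char)
      then acc1 ++ [PySem.Chars.lowerChar p] else acc1) = fun acc p => acc ++ gVow p := by
    funext acc p; simp only [gVow]; split_ifs with hv <;> simp_all
  simp only [h1, h2, PySem.List.foldl_append_eq_flatMap, List.nil_append,
    PySem.Chars.lower, List.map_flatMap, replace_single, List.flatMap_assoc]
  congr 1
  apply List.flatMap_congr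
  intro c _
  simp only [fA, List.flatMap_assoc]

lemma char_table (c : Char) (h : pvDomChar c = true) :
    fA c = bTable.getD c [] := by
  have hle : c.toNat < 127 := by
    simp only [pvDomChar, Bool.or_eq_true, Bool.and_eq_true, decide_eq_true_eq,
      beq_iff_eq] at h
    omega
  have hall : ∀ n : Nat, n < 127 → pvDomChar (Char.ofNat n) = true →
      fA (Char.ofNat n) = bTable.getD (Char.ofNat n) [] := by
    set_option maxRecDepth 40000 in decide
  have hc : Char.ofNat c.toNat = c := Char.ofNat_toNat c
  simpa [hc] using hall c.toNat hle (by rw [hc]; exact h)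

-- ===== VERDICT (by name: the statement is the Claim_ definition above) =====
set_option maxRecDepth 40000 in
theorem changer_spec : Claim_equal_changer := by
  intro s hdom
  unfold Dom_changer pvDomStr at hdom
  unfold Spec_changer changer_alt
  rw [changer_eq_flatMap]
  congr 1
  apply List.flatMap_congr
  intro c hc
  exact char_table c (List.all_eq_true.mp hdom c hc)
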